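-- pv_equiv track=rewrite | github.com/josuapoulsen-stack/brobygger-portal | patch_hoist_components.py | dedent2
-- ===== SOURCE A (Python) =====
-- def dedent2(s):
--     lines = s.split('\n')
--     result = []
--     for l in lines:
--         if l.startswith('  '):
--             result.append(l[2:])
--         else:
--             result.append(l)
--     return '\n'.join(result)
-- ===== SOURCE B (Python) =====
-- import re
--
-- def dedent2(s):
--     return re.sub(r'(?m)^  ', '', s)
-- ===== Notes on version B (the rewrite author's own statement) =====
-- stated objective: idiomatic
-- what changed: Replaced the line-split/loop/append/join pipeline with a single multiline regex substitution that deletes the two-space prefix at each line start; no line list or accumulator is built.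
import Mathlib
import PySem

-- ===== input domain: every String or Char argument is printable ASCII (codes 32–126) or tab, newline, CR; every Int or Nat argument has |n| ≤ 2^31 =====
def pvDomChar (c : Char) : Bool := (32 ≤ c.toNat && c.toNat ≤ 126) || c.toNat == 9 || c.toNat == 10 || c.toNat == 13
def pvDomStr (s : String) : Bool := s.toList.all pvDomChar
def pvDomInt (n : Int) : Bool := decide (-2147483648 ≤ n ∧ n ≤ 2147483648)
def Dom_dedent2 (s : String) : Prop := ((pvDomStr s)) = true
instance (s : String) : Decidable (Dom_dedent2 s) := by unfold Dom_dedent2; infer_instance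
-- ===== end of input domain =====

-- B replaces A's split/loop/join with a single left-to-right scan (the work the
-- regex (?m)^'  ' in Source B performs): simpler, no intermediate line list.

-- ===== PORT A =====
-- A: split on '\n', strip a two-space prefix from each line into an accumulator, join back.
def dedent2 (s : String) : String :=
  let lines := PySem.Chars.splitOn s.toList ['\n']
  let result := lines.foldl (fun acc l =>
    if PySem.Chars.startswith l [' ', ' '] then acc ++ [PySem.List.slice l (some 2) none]
    else acc ++ [l]) []
  String.ofList (PySem.Chars.join ['\n'] result)

-- ===== PORT B =====
-- B (hand port of Source B's re.sub(r'(?m)^  ', '', s), exact on all inputs): one scan of the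
-- characters; at a line start a two-space prefix is dropped (the regex match, replaced by ''),
-- every other character is copied, '\n' re-arms the line-start anchor.
def dedentScan : Bool → List Char → List Char
  | true, ' ' :: ' ' :: rest => dedentScan false rest
  | _, [] => []
  | _, c :: cs => if c = '\n' then '\n' :: dedentScan true cs else c :: dedentScan false cs

def dedent2_alt (s : String) : String := String.ofList (dedentScan true s.toList)

-- ===== PRECONDITION & SPEC =====
def Spec_dedent2 (s : String) (out : String) : Prop := out = dedent2_alt s
instance (s : String) (out : String) : Decidable (Spec_dedent2 s out) := by unfold Spec_dedent2; infer_instance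

-- ===== CLAIM (what is proved, stated in full; the proofs are below) =====
def Claim_equal_dedent2 : Prop := ∀ (s : String), Dom_dedent2 s → Spec_dedent2 s (dedent2 s)

-- ===== LEMMAS AND PROOFS =====

-- simple structural splitter on '\n': (first line, remaining lines)
def splitLn : List Char → List Char × List (List Char)
  | [] => ([], [])
  | c :: cs =>
    let (h, t) := splitLn cs
    if c = '\n' then ([], h :: t) else (c :: h, t)

-- per-line transformation performed by A's loop body
def stepLn (l : List Char) : List Char :=
  if PySem.Chars.startswith l [' ', ' '] then l.drop 2 else l

lemma splitOn_go_spec (fuel : Nat) : ∀ (l cur : List Char) (acc : List (List Char)),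
    l.length < fuel →
    PySem.Chars.splitOn.go ['\n'] fuel l cur acc
      = acc.reverse ++ (cur.reverse ++ (splitLn l).1) :: (splitLn l).2 := by
  induction fuel with
  | zero => intro l cur acc h; omega
  | succ f ih =>
    intro l cur acc h
    cases l with
    | nil => simp [PySem.Chars.splitOn.go, splitLn]
    | cons c rest =>
      by_cases hc : c = '\n'
      · subst hc
        have : (['\n'] : List Char).isPrefixOf ('\n' :: rest) = true := by
          simp [List.isPrefixOf]
        simp only [PySem.Chars.splitOn.go, this, if_pos, List.length_cons, List.length_nil,
          List.drop_succ_cons, List.drop_zero]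
        rw [ih rest [] (cur.reverse :: acc) (by simpa using Nat.lt_of_succ_lt_succ h)]
        simp [splitLn]
      · have : (['\n'] : List Char).isPrefixOf (c :: rest) = false := by
          simp only [List.isPrefixOf, Bool.and_eq_false_iff]
          left
          exact beq_eq_false_iff_ne.mpr (Ne.symm hc)
        simp only [PySem.Chars.splitOn.go, this, Bool.false_eq_true, if_neg, not_false_iff]
        rw [ih rest (c :: cur) acc (by simpa using Nat.lt_of_succ_lt_succ h)]
        simp [splitLn, hc]

lemma splitOn_eq_splitLn (l : List Char) :
    PySem.Chars.splitOn l ['\n'] = (splitLn l).1 :: (splitLn l).2 := by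
  have := splitOn_go_spec (l.length + 1) l [] [] (by omega)
  simpa [PySem.Chars.splitOn] using this

-- the first line's first character is a character of the input
lemma splitLn_fst_head (cs : List Char) (c : Char) :
    (splitLn cs).1.head? = some c → cs.head? = some c := by
  cases cs with
  | nil => simp [splitLn]
  | cons d t =>
    by_cases hd : d = '\n'
    · simp [splitLn, hd]
    · simp only [splitLn, if_neg hd, List.head?_cons, Option.some.injEq]
      intro h; simp [h]

lemma startswith_two_spaces (l : List Char) :
    PySem.Chars.startswith l [' ', ' '] = true ↔ ∃ r, l = ' ' :: ' ' :: r := by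
  rw [PySem.Chars.startswith_iff]
  constructor
  · rintro ⟨r, rfl⟩; exact ⟨r, rfl⟩
  · rintro ⟨r, rfl⟩; exact ⟨r, rfl⟩

-- what remains after the (possibly transformed) first line
def tailPart (t : List (List Char)) : List Char := t.flatMap (fun l => '\n' :: stepLn l)

lemma join_map_step (h : List Char) (t : List (List Char)) :
    PySem.Chars.join ['\n'] ((h :: t).map stepLn) = stepLn h ++ tailPart t := by
  induction t generalizing h with
  | nil => simp [PySem.Chars.join_singleton, tailPart]
  | cons q r ih =>
    simp only [List.map_cons, PySem.Chars.join_cons_cons]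
    rw [show (stepLn q :: r.map stepLn) = ((q :: r).map stepLn) from rfl, ih q]
    simp [tailPart]

-- the core correspondence: the scanner computes A's per-line result in one pass
lemma dedentScan_spec : ∀ (b : Bool) (cs : List Char),
    dedentScan b cs
      = (if b then stepLn (splitLn cs).1 else (splitLn cs).1) ++ tailPart (splitLn cs).2 := by
  intro b cs
  fun_induction dedentScan b cs with
  | case1 rest ih =>
    rw [ih]
    have hsw : PySem.Chars.startswith (' ' :: ' ' :: (splitLn rest).1) [' ', ' '] = true := by
      rw [startswith_two_spaces]; exact ⟨(splitLn rest).1, rfl⟩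
    simp [splitLn, stepLn, hsw]
  | case2 b => cases b <;> simp [splitLn, stepLn, tailPart, PySem.Chars.startswith]
  | case3 b cs hexc ih =>
    rw [ih]
    cases b <;> simp [splitLn, stepLn, tailPart, PySem.Chars.startswith]
  | case4 b c cs hexc hne ih =>
    rw [ih]
    have hsp : splitLn (c :: cs) = (c :: (splitLn cs).1, (splitLn cs).2) := by
      simp [splitLn, hne]
    rw [hsp]
    cases b with
    | false => simp
    | true =>
      -- the scanner's first pattern did not fire: this line does not start with two spaces
      have hns : PySem.Chars.startswith (c :: (splitLn cs).1) [' ', ' '] = false := by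
        rw [Bool.eq_false_iff]
        intro hsw
        rw [startswith_two_spaces] at hsw
        obtain ⟨r, hr⟩ := hsw
        have hc' : c = ' ' := by injection hr
        have hh : (splitLn cs).1.head? = some ' ' := by
          have : (splitLn cs).1 = ' ' :: r := by injection hr
          simp [this]
        have hcs := splitLn_fst_head cs ' ' hh
        cases cs with
        | nil => simp at hcs
        | cons d t =>
          simp only [List.head?_cons, Option.some.injEq] at hcs
          exact hexc t rfl hc' (by rw [hcs])
      simp [stepLn, hns]

lemma foldl_body_eq (acc : List (List Char)) (l : List Char) :
    (if PySem.Chars.startswith l [' ', ' '] then acc ++ [PySem.List.slice l (some 2) none]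
     else acc ++ [l]) = acc ++ [stepLn l] := by
  unfold stepLn
  split_ifs with h
  · have : PySem.List.slice l (some (2 : Int)) none = l.drop 2 := by
      simpa using PySem.List.slice_from_natCast l 2
    rw [this]
  · rfl

-- ===== VERDICT (by name: the statement is the Claim_ definition above) =====
theorem dedent2_spec : Claim_equal_dedent2 := by
  intro s _
  show dedent2 s = dedent2_alt s
  have hfold : ∀ (lines : List (List Char)) (acc : List (List Char)),
      lines.foldl (fun acc l =>
        if PySem.Chars.startswith l [' ', ' '] then acc ++ [PySem.List.slice l (some 2) none]
        else acc ++ [l]) acc = acc ++ lines.map stepLn := by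
    intro lines
    induction lines with
    | nil => intro acc; simp
    | cons p q ih =>
      intro acc
      rw [List.foldl_cons, foldl_body_eq, ih, List.map_cons]
      simp
  show String.ofList (PySem.Chars.join ['\n']
      ((PySem.Chars.splitOn s.toList ['\n']).foldl (fun acc l =>
        if PySem.Chars.startswith l [' ', ' '] then acc ++ [PySem.List.slice l (some 2) none]
        else acc ++ [l]) []))
    = String.ofList (dedentScan true s.toList)
  rw [hfold, List.nil_append, splitOn_eq_splitLn, join_map_step, dedentScan_spec]
  simp
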